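-- pv_equiv track=rewrite | github.com/architect-xyz/architect-py | scripts/prune_graphql_schema.py | fix_docstring_indentation
-- ===== SOURCE A (Python) =====
-- def fix_docstring_indentation(sdl: str) -> str:
--     """Indent docstring bodies by two spaces so they remain readable."""
--     lines = sdl.splitlines()
--     in_doc = False
--     for i, line in enumerate(lines):
--         if line.startswith('"""'):
--             in_doc = not in_doc
--         elif in_doc:
--             lines[i] = f"  {line}"
--     return "\n".join(lines)
-- ===== SOURCE B (Python) =====
-- def fix_docstring_indentation(sdl: str) -> str:
--     """Two-pass: compute a fence flag and an incoming-parity flag per line,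
--     then build the output in a separate comprehension."""
--     lines = sdl.splitlines()
--     fence = [line.startswith('"""') for line in lines]
--     inside = []
--     parity = False
--     for f in fence:
--         inside.append(parity)
--         parity = parity != f
--     fixed = ["  " + line if ins and not f else line
--              for line, f, ins in zip(lines, fence, inside)]
--     return "\n".join(fixed)
-- ===== Notes on version B (the rewrite author's own statement) =====
-- stated objective: alternative
-- what changed: Replaces A's single stateful in-place mutation loop by a two-pass decomposition: a flag-table pass computing per-line fence and incoming-parity flags, then a pure comprehension over zip building the output.
import Mathlib
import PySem

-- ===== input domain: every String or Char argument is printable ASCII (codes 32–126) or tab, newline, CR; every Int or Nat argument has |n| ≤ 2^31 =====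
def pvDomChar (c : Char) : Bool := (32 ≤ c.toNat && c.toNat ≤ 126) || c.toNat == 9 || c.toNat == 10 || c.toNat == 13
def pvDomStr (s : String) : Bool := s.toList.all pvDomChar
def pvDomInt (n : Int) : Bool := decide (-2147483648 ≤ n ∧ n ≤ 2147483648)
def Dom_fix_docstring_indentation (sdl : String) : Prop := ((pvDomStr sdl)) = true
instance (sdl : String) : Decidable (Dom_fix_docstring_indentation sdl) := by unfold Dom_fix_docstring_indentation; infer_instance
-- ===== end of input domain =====

-- B replaces A's single stateful in-place mutation loop by a two-pass decomposition
-- (per-line fence/parity flag table, then a pure mapping over zip); alternative, same cost.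


-- ===== PORT A =====
-- one fold over the lines carrying (rewritten lines so far, in_doc), as A's loop does
def fix_docstring_indentation (sdl : String) : String :=
  let lines := PySem.Str.splitlines sdl
  let out := lines.foldl (fun (acc : List String × Bool) line =>
    if PySem.Str.startswith line "\"\"\"" then (acc.1 ++ [line], !acc.2)
    else if acc.2 then (acc.1 ++ ["  " ++ line], acc.2)
    else (acc.1 ++ [line], acc.2)) ([], false)
  PySem.Str.join "\n" out.1

-- ===== PORT B =====
def fix_docstring_indentation_alt (sdl : String) : String :=
  let lines := PySem.Str.splitlines sdl
  let fence := lines.map (fun line => PySem.Str.startswith line "\"\"\"")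
  let inside := (fence.foldl (fun (acc : List Bool × Bool) f =>
      (acc.1 ++ [acc.2], acc.2 != f)) ([], false)).1
  let fixed := (lines.zip (fence.zip inside)).map (fun p =>
      if p.2.2 && !p.2.1 then "  " ++ p.1 else p.1)
  PySem.Str.join "\n" fixed

-- ===== PRECONDITION & SPEC =====
def Spec_fix_docstring_indentation (sdl : String) (out : String) : Prop := out = fix_docstring_indentation_alt sdl
instance (sdl : String) (out : String) : Decidable (Spec_fix_docstring_indentation sdl out) := by unfold Spec_fix_docstring_indentation; infer_instance

-- ===== CLAIM (what is proved, stated in full; the proofs are below) =====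
def Claim_equal_fix_docstring_indentation : Prop := ∀ (sdl : String), Dom_fix_docstring_indentation sdl → Spec_fix_docstring_indentation sdl (fix_docstring_indentation sdl)

-- ===== LEMMAS AND PROOFS =====

-- reference recursion both ports are reduced to
def pvGo (ls : List String) (b : Bool) : List String :=
  match ls with
  | [] => []
  | l :: ls =>
    if PySem.Str.startswith l "\"\"\"" then l :: pvGo ls (!b)
    else (if b then "  " ++ l else l) :: pvGo ls b

def pvInside (fs : List Bool) (b : Bool) : List Bool :=
  match fs with
  | [] => []
  | f :: fs => b :: pvInside fs (b != f)

lemma pvA_fold (ls : List String) (acc : List String) (b : Bool) :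
    (ls.foldl (fun (acc : List String × Bool) line =>
      if PySem.Str.startswith line "\"\"\"" then (acc.1 ++ [line], !acc.2)
      else if acc.2 then (acc.1 ++ ["  " ++ line], acc.2)
      else (acc.1 ++ [line], acc.2)) (acc, b)).1 = acc ++ pvGo ls b := by
  induction ls generalizing acc b with
  | nil => simp [pvGo]
  | cons l ls ih =>
    simp only [List.foldl_cons, pvGo]
    by_cases h : PySem.Str.startswith l "\"\"\"" = true
    · have hx := ih (acc ++ [l]) (!b)
      simp at h hx
      simp [h, hx]
    · cases b
      · have hx := ih (acc ++ [l]) false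
        simp at h hx
        simp [h, hx]
      · have hx := ih (acc ++ ["  " ++ l]) true
        simp at h hx
        simp [h, hx]

lemma pvInside_fold (fs : List Bool) (acc : List Bool) (b : Bool) :
    (fs.foldl (fun (acc : List Bool × Bool) f =>
      (acc.1 ++ [acc.2], acc.2 != f)) (acc, b)).1 = acc ++ pvInside fs b := by
  induction fs generalizing acc b with
  | nil => simp [pvInside]
  | cons f fs ih => simp [pvInside, ih]

lemma pvB_zip (ls : List String) (b : Bool) :
    ((ls.zip ((ls.map (fun line => PySem.Str.startswith line "\"\"\"")).zip
        (pvInside (ls.map (fun line => PySem.Str.startswith line "\"\"\"")) b))).map (fun p =>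
      if p.2.2 && !p.2.1 then "  " ++ p.1 else p.1)) = pvGo ls b := by
  induction ls generalizing b with
  | nil => simp [pvGo]
  | cons l ls ih =>
    simp only [List.map_cons, pvInside, List.zip_cons_cons, pvGo]
    by_cases h : PySem.Str.startswith l "\"\"\"" = true
    · cases b
      · have hx := ih true
        simp at h hx
        simp [h, hx]
      · have hx := ih false
        simp at h hx
        simp [h, hx]
    · cases b
      · have hx := ih false
        simp at h hx
        simp [h, hx]
      · have hx := ih true
        simp at h hx
        simp [h, hx]

-- ===== VERDICT (by name: the statement is the Claim_ definition above) =====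
theorem fix_docstring_indentation_spec : Claim_equal_fix_docstring_indentation := by
  intro sdl _
  unfold Spec_fix_docstring_indentation fix_docstring_indentation fix_docstring_indentation_alt
  simp only [pvA_fold, pvInside_fold, pvB_zip, List.nil_append]
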